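-- pv_equiv track=rewrite | github.com/NivZetuni/Image-processing-Project | project.py | check_if_same_dic
-- ===== SOURCE A (Python) =====
-- def check_if_same_dic(arr, point):
--     arr_of_vars = [[item for item in arr if item[0] == (point[0] - 1)],
--                    [item for item in arr if item[0] == (point[0] + 1)],
--                    [item for item in arr if item[1] == (point[1] - 1)],
--                    [item for item in arr if item[1] == (point[1] + 1)]]
--     if len(arr) == 2:
--         for var in arr_of_vars:
--             if len(var) == 2:
--                 return True
--         return False
--     if len(arr) == 3:
--         for var in arr_of_vars:
--             if len(var) == 3:
--                 return True
--         return False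
-- ===== SOURCE B (Python) =====
-- def check_if_same_dic(arr, point):
--     if len(arr) not in (2, 3):
--         return None
--     xs = {item[0] for item in arr}
--     ys = {item[1] for item in arr}
--     return (xs == {point[0] - 1} or xs == {point[0] + 1}
--             or ys == {point[1] - 1} or ys == {point[1] + 1})
-- ===== Notes on version B (the rewrite author's own statement) =====
-- stated objective: alternative
-- what changed: Instead of building four filtered lists and testing their lengths against len(arr), B collapses arr to the set of x-coordinates and the set of y-coordinates and checks whether either set equals the corresponding singleton {point coordinate +/- 1} (all points share that line iff the coordinate set is a singleton).
import Mathlib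
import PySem

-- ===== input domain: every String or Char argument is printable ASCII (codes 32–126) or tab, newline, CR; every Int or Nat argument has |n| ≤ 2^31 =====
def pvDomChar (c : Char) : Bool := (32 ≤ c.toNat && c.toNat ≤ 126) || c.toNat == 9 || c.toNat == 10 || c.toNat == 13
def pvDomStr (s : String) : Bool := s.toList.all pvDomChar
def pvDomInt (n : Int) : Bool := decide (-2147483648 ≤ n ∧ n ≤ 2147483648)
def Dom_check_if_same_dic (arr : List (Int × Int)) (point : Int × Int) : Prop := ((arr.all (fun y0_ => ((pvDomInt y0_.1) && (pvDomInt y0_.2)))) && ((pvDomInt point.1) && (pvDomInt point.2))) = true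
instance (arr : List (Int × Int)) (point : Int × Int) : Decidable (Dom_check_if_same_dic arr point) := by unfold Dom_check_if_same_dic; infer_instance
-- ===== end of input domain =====

-- B replaces A's four filtered lists + length tests by a set-based check: the
-- points all share a coordinate line iff the set of that coordinate is the
-- matching singleton (objective: alternative). A returns None (none) when
-- len(arr) is not 2 or 3; B preserves that.

-- ===== PORT A =====
def check_if_same_dic (arr : List (Int × Int)) (point : Int × Int) : Option Bool :=
  let arr_of_vars : List (List (Int × Int)) :=
    [arr.filter (fun item => item.1 == point.1 - 1),
     arr.filter (fun item => item.1 == point.1 + 1),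
     arr.filter (fun item => item.2 == point.2 - 1),
     arr.filter (fun item => item.2 == point.2 + 1)]
  if arr.length = 2 then
    some (arr_of_vars.any (fun var => var.length == 2))
  else if arr.length = 3 then
    some (arr_of_vars.any (fun var => var.length == 3))
  else none

-- ===== PORT B =====
def check_if_same_dic_alt (arr : List (Int × Int)) (point : Int × Int) : Option Bool :=
  if arr.length = 2 ∨ arr.length = 3 then
    let xs : PySem.Set Int := PySem.Set.ofList (arr.map Prod.fst)
    let ys : PySem.Set Int := PySem.Set.ofList (arr.map Prod.snd)
    some (PySem.Set.equal xs (PySem.Set.ofList [point.1 - 1]) ||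
          PySem.Set.equal xs (PySem.Set.ofList [point.1 + 1]) ||
          PySem.Set.equal ys (PySem.Set.ofList [point.2 - 1]) ||
          PySem.Set.equal ys (PySem.Set.ofList [point.2 + 1]))
  else none

-- ===== PRECONDITION & SPEC =====
def Spec_check_if_same_dic (arr : List (Int × Int)) (point : Int × Int) (out : Option Bool) : Prop := out = check_if_same_dic_alt arr point
instance (arr : List (Int × Int)) (point : Int × Int) (out : Option Bool) : Decidable (Spec_check_if_same_dic arr point out) := by unfold Spec_check_if_same_dic; infer_instance

-- ===== CLAIM (what is proved, stated in full; the proofs are below) =====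
def Claim_equal_check_if_same_dic : Prop := ∀ (arr : List (Int × Int)) (point : Int × Int), Dom_check_if_same_dic arr point → Spec_check_if_same_dic arr point (check_if_same_dic arr point)

-- ===== LEMMAS AND PROOFS =====

theorem filter_full_iff_set_singleton (arr : List (Int × Int)) (f : Int × Int → Int) (v : Int) (hne : arr ≠ []) :
    ((arr.filter (fun item => f item == v)).length == arr.length)
      = PySem.Set.equal (PySem.Set.ofList (arr.map f)) (PySem.Set.ofList [v]) := by
  rw [Bool.eq_iff_iff]
  simp only [beq_iff_eq, List.length_filter_eq_length_iff, beq_iff_eq]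
  simp [PySem.Set.equal]
  constructor
  · intro h
    refine ⟨fun x a b hab hfx => hfx ▸ h a b hab, ?_⟩
    obtain ⟨⟨a, b⟩, hab⟩ := List.exists_mem_of_ne_nil arr hne
    exact ⟨a, b, hab, h a b hab⟩
  · rintro ⟨h, -⟩ a b hab
    exact h (f (a, b)) a b hab rfl

-- ===== VERDICT (by name: the statement is the Claim_ definition above) =====
theorem check_if_same_dic_spec : Claim_equal_check_if_same_dic := by
  intro arr point _
  unfold Spec_check_if_same_dic check_if_same_dic check_if_same_dic_alt
  by_cases h2 : arr.length = 2
  · have hne : arr ≠ [] := by rintro rfl; simp at h2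
    rw [if_pos h2, if_pos (Or.inl h2)]
    congr 1
    simp only [List.any_cons, List.any_nil, Bool.or_false]
    rw [← h2]
    rw [filter_full_iff_set_singleton arr Prod.fst (point.1 - 1) hne,
        filter_full_iff_set_singleton arr Prod.fst (point.1 + 1) hne,
        filter_full_iff_set_singleton arr Prod.snd (point.2 - 1) hne,
        filter_full_iff_set_singleton arr Prod.snd (point.2 + 1) hne]
    simp [Bool.or_assoc]
  · by_cases h3 : arr.length = 3
    · have hne : arr ≠ [] := by rintro rfl; simp at h3
      rw [if_neg h2, if_pos h3, if_pos (Or.inr h3)]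
      congr 1
      simp only [List.any_cons, List.any_nil, Bool.or_false]
      rw [← h3]
      rw [filter_full_iff_set_singleton arr Prod.fst (point.1 - 1) hne,
          filter_full_iff_set_singleton arr Prod.fst (point.1 + 1) hne,
          filter_full_iff_set_singleton arr Prod.snd (point.2 - 1) hne,
          filter_full_iff_set_singleton arr Prod.snd (point.2 + 1) hne]
      simp [Bool.or_assoc]
    · rw [if_neg h2, if_neg h3, if_neg (by tauto)]
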